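-- pv_equiv track=rewrite | github.com/VinSev/Advent-of-Code-2023 | day_22/brick_processor.py | move_brick
-- ===== SOURCE A (Python) =====
-- from typing import List, Tuple, Set
--
-- def move_brick(brick: Set[Tuple[int, int, int]], settled: Set[Tuple[int, int, int]]) -> Tuple[Set[Tuple[int, int, int]], bool]:
--     did_move = False
--
--     while True:
--         next_position = set((x, y, z - 1) for x, y, z in brick)
--
--         if all((cube[2] != 0 and (cube not in settled)) for cube in next_position):
--             brick = next_position
--             did_move = True
--         else:
--             break
--
--     for cube in brick:
--         settled.add(cube)
--
--     return brick, did_move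
-- ===== SOURCE B (Python) =====
-- def move_brick(brick, settled):
--     # closed form: compute the single drop distance d instead of stepping down one z at a time
--     d = None
--     for (x, y, z) in brick:
--         h = 0 if z >= 1 else None  # highest blocker strictly below z; floor counts only above ground
--         for (sx, sy, sz) in settled:
--             if sx == x and sy == y and sz < z and (h is None or sz > h):
--                 h = sz
--         if h is not None:
--             drop = z - 1 - h
--             if d is None or drop < d:
--                 d = drop
--     if d is None or d == 0:
--         settled.update(brick)
--         return brick, False
--     new_brick = set((x, y, z - d) for (x, y, z) in brick)
--     settled.update(new_brick)
--     return new_brick, True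
-- ===== Notes on version B (the rewrite author's own statement) =====
-- stated objective: alternative
-- what changed: B replaces A's step-by-step falling loop (re-test every cube at each z level) by one pass that computes, per cube, the highest blocker strictly below it (settled cube in the same column, or the floor) and drops the whole brick by the minimum clearance in a single subtraction; it trades A's dependence on the drop distance for a full brick-times-settled scan.
import Mathlib
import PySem

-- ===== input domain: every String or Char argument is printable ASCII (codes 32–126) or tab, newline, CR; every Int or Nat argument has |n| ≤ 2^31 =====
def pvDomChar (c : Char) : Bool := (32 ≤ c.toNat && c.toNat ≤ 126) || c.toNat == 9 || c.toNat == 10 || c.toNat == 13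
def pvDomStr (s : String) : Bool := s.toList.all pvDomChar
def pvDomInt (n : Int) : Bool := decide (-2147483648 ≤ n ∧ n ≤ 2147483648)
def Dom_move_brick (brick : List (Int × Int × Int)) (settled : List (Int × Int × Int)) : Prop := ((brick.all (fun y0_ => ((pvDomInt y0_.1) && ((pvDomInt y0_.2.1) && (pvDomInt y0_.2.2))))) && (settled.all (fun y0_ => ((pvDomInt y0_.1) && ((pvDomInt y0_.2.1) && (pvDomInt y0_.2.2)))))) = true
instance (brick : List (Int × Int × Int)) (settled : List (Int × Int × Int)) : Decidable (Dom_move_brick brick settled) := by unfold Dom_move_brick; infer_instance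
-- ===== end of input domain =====

-- B replaces A's one-z-at-a-time falling loop by a single drop distance computed in one pass over
-- brick × settled; both Pythons mutate the caller's `settled` set in place by adding the rested
-- cubes (the equivalence proved here is about the RETURN value only).

-- ===== PORT A =====
-- next_position = set((x, y, z - 1) for x, y, z in brick)
def pvNext (b : List (Int × Int × Int)) : List (Int × Int × Int) :=
  PySem.Set.ofList (b.map (fun c => (c.1, c.2.1, c.2.2 - 1)))

-- all((cube[2] != 0 and (cube not in settled)) for cube in next_position)
def pvCondA (settled np : List (Int × Int × Int)) : Bool :=
  np.all (fun cube => (cube.2.2 != 0) && !(PySem.Set.contains settled cube))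

-- the `while True` loop; the Nat argument is only a totality guard (fuel), chosen in move_brick
-- large enough that under Pre_ it is never exhausted
def pvLoopA (settled : List (Int × Int × Int)) :
    Nat → List (Int × Int × Int) → Bool → (List (Int × Int × Int)) × Bool
  | 0, b, dm => (b, dm)
  | n+1, b, dm =>
    if pvCondA settled (pvNext b) then pvLoopA settled n (pvNext b) true else (b, dm)

def pvFuel (brick settled : List (Int × Int × Int)) : Nat :=
  (brick.map (fun c => c.2.2.natAbs)).sum + (settled.map (fun c => c.2.2.natAbs)).sum + 1

def move_brick (brick : List (Int × Int × Int)) (settled : List (Int × Int × Int)) :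
    (List (Int × Int × Int)) × Bool :=
  pvLoopA settled (pvFuel brick settled) brick false

-- ===== PORT B =====
-- (h is None or sz > h)
def pvGuard (h : Option Int) (w : Int) : Bool :=
  match h with | none => true | some hv => decide (hv < w)

-- inner loop of Source B: highest blocker strictly below z in this column (floor only if z >= 1)
def pvHFor (settled : List (Int × Int × Int)) (x y z : Int) : Option Int :=
  settled.foldl
    (fun h s =>
      if s.1 == x && s.2.1 == y && decide (s.2.2 < z) && pvGuard h s.2.2
      then some s.2.2 else h)
    (if 1 ≤ z then some 0 else none)

-- (d is None or drop < d)
def pvGuardMin (d : Option Int) (w : Int) : Bool :=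
  match d with | none => true | some dv => decide (w < dv)

-- outer loop of Source B: minimum allowed drop over the brick's cubes
def pvDFor (brick settled : List (Int × Int × Int)) : Option Int :=
  brick.foldl
    (fun d c =>
      match pvHFor settled c.1 c.2.1 c.2.2 with
      | none => d
      | some h => if pvGuardMin d (c.2.2 - 1 - h) then some (c.2.2 - 1 - h) else d)
    none

def move_brick_alt (brick : List (Int × Int × Int)) (settled : List (Int × Int × Int)) :
    (List (Int × Int × Int)) × Bool :=
  match pvDFor brick settled with
  | none => (brick, false)
  | some d =>
    if d = 0 then (brick, false)
    else (PySem.Set.ofList (brick.map (fun c => (c.1, c.2.1, c.2.2 - d))), true)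

-- ===== PRECONDITION & SPEC =====
-- Pre_ excludes exactly the inputs on which A's `while True` never breaks (no cube of the brick
-- can ever be blocked by the floor or by a settled cube): there Python A diverges, returning nothing.
def Pre_move_brick (brick : List (Int × Int × Int)) (settled : List (Int × Int × Int)) : Prop :=
  ∃ c ∈ brick, 1 ≤ c.2.2 ∨ ∃ s ∈ settled, s.1 = c.1 ∧ s.2.1 = c.2.1 ∧ s.2.2 < c.2.2
instance (brick : List (Int × Int × Int)) (settled : List (Int × Int × Int)) : Decidable (Pre_move_brick brick settled) := by unfold Pre_move_brick; infer_instance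

def pvWitness_move_brick : (List (Int × Int × Int)) × (List (Int × Int × Int)) :=
  ([(0, 0, 3)], [(0, 0, 1)])

def Spec_move_brick (brick : List (Int × Int × Int)) (settled : List (Int × Int × Int)) (out : (List (Int × Int × Int)) × Bool) : Prop := out = move_brick_alt brick settled
instance (brick : List (Int × Int × Int)) (settled : List (Int × Int × Int)) (out : (List (Int × Int × Int)) × Bool) : Decidable (Spec_move_brick brick settled out) := by unfold Spec_move_brick; infer_instance

-- ===== CLAIM (what is proved, stated in full; the proofs are below) =====
def Claim_equal_move_brick : Prop := ∀ (brick : List (Int × Int × Int)) (settled : List (Int × Int × Int)), Dom_move_brick brick settled → Pre_move_brick brick settled → Spec_move_brick brick settled (move_brick brick settled)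

-- ===== LEMMAS AND PROOFS =====

-- z' is a blocker candidate for a cube of the brick at (x, y, z)
def IsCand (settled : List (Int × Int × Int)) (x y z z' : Int) : Prop :=
  (z' = 0 ∧ 1 ≤ z) ∨ ((x, y, z') ∈ settled ∧ z' < z)

-- the brick shifted down by k
def dropK (b : List (Int × Int × Int)) (k : Int) : List (Int × Int × Int) :=
  b.map (fun c => (c.1, c.2.1, c.2.2 - k))

-- "moving the whole brick down to level (z - k) is unobstructed"
def CondK (brick settled : List (Int × Int × Int)) (k : Int) : Prop :=
  ∀ c ∈ brick, c.2.2 - k ≠ 0 ∧ (c.1, c.2.1, c.2.2 - k) ∉ settled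

theorem hfold_mono (x y z : Int) (l : List (Int × Int × Int)) :
    ∀ (a : Option Int) (av : Int), a = some av →
      ∃ h, l.foldl
        (fun h s =>
          if s.1 == x && s.2.1 == y && decide (s.2.2 < z) && pvGuard h s.2.2
          then some s.2.2 else h) a = some h ∧ av ≤ h := by
  induction l with
  | nil => intro a av ha; exact ⟨av, by simpa using ha, le_refl av⟩
  | cons s t ih =>
    intro a av ha
    subst ha
    rw [List.foldl_cons]
    by_cases hc : (s.1 == x && s.2.1 == y && decide (s.2.2 < z) && pvGuard (some av) s.2.2) = true
    · rw [if_pos hc]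
      simp only [pvGuard, Bool.and_eq_true, decide_eq_true_eq, beq_iff_eq] at hc
      obtain ⟨h, hf, hle⟩ := ih (some s.2.2) s.2.2 rfl
      exact ⟨h, hf, le_trans (le_of_lt hc.2) hle⟩
    · rw [if_neg hc]
      exact ih (some av) av rfl

theorem hfold_mem (x y z : Int) (l : List (Int × Int × Int)) :
    ∀ (a : Option Int) (s : Int × Int × Int), s ∈ l → s.1 = x → s.2.1 = y → s.2.2 < z →
      ∃ h, l.foldl
        (fun h s =>
          if s.1 == x && s.2.1 == y && decide (s.2.2 < z) && pvGuard h s.2.2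
          then some s.2.2 else h) a = some h ∧ s.2.2 ≤ h := by
  induction l with
  | nil => intro a s hs; simp at hs
  | cons s' t ih =>
    intro a s hs hx hy hz
    rw [List.foldl_cons]
    rcases List.mem_cons.mp hs with heq | hmem
    · subst heq
      by_cases hc : (s.1 == x && s.2.1 == y && decide (s.2.2 < z) && pvGuard a s.2.2) = true
      · rw [if_pos hc]
        exact hfold_mono x y z t (some s.2.2) s.2.2 rfl
      · rw [if_neg hc]
        cases a with
        | none => exfalso; apply hc; simp [pvGuard, hx, hy, hz]
        | some av =>
          have hav : ¬ av < s.2.2 := by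
            intro hlt; apply hc; simp [pvGuard, hx, hy, hz, hlt]
          obtain ⟨h, hf, hle⟩ := hfold_mono x y z t (some av) av rfl
          exact ⟨h, hf, le_trans (by omega) hle⟩
    · exact ih _ s hmem hx hy hz

theorem hfold_some (x y z : Int) (l : List (Int × Int × Int)) :
    ∀ (a : Option Int) (h : Int),
      l.foldl
        (fun h s =>
          if s.1 == x && s.2.1 == y && decide (s.2.2 < z) && pvGuard h s.2.2
          then some s.2.2 else h) a = some h →
      ((x, y, h) ∈ l ∧ h < z) ∨ a = some h := by
  induction l with
  | nil => intro a h hf; right; simpa using hf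
  | cons s t ih =>
    intro a h hf
    rw [List.foldl_cons] at hf
    rcases ih _ h hf with ⟨hm, hlt⟩ | heq
    · exact Or.inl ⟨List.mem_cons_of_mem _ hm, hlt⟩
    · by_cases hc : (s.1 == x && s.2.1 == y && decide (s.2.2 < z) && pvGuard a s.2.2) = true
      · rw [if_pos hc] at heq
        simp only [Bool.and_eq_true, decide_eq_true_eq, beq_iff_eq] at hc
        obtain ⟨⟨⟨hx, hy⟩, hz⟩, -⟩ := hc
        have hse : s.2.2 = h := by simpa using heq
        have : (x, y, h) = s := by
          obtain ⟨s1, s2, s3⟩ := s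
          simp only [Option.some.injEq] at heq
          simp_all
        rw [this]
        exact Or.inl ⟨List.mem_cons_self, by omega⟩
      · rw [if_neg hc] at heq
        exact Or.inr heq

theorem hFor_some (settled : List (Int × Int × Int)) (x y z h : Int)
    (hh : pvHFor settled x y z = some h) : IsCand settled x y z h := by
  rcases hfold_some x y z settled _ h hh with ⟨hm, hlt⟩ | heq
  · exact Or.inr ⟨hm, hlt⟩
  · by_cases hz : 1 ≤ z
    · rw [if_pos hz] at heq
      simp only [Option.some.injEq] at heq
      exact Or.inl ⟨heq.symm, hz⟩
    · rw [if_neg hz] at heq; cases heq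

theorem hFor_cand (settled : List (Int × Int × Int)) (x y z z' : Int)
    (hc : IsCand settled x y z z') : ∃ h, pvHFor settled x y z = some h ∧ z' ≤ h := by
  rcases hc with ⟨hz0, hz1⟩ | ⟨hmem, hlt⟩
  · subst hz0
    unfold pvHFor
    rw [if_pos hz1]
    exact hfold_mono x y z settled (some 0) 0 rfl
  · exact hfold_mem x y z settled _ (x, y, z') hmem rfl rfl hlt

-- (d is None or drop < d)

theorem dfold_mono (settled : List (Int × Int × Int)) (l : List (Int × Int × Int)) :
    ∀ (a : Option Int) (av : Int), a = some av →
      ∃ d, l.foldl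
        (fun d c =>
          match pvHFor settled c.1 c.2.1 c.2.2 with
          | none => d
          | some h => if pvGuardMin d (c.2.2 - 1 - h) then some (c.2.2 - 1 - h) else d) a
        = some d ∧ d ≤ av := by
  induction l with
  | nil => intro a av ha; exact ⟨av, by simpa using ha, le_refl av⟩
  | cons c t ih =>
    intro a av ha
    subst ha
    rw [List.foldl_cons]
    cases hh : pvHFor settled c.1 c.2.1 c.2.2 with
    | none => simpa [hh] using ih (some av) av rfl
    | some h =>
      by_cases hg : pvGuardMin (some av) (c.2.2 - 1 - h) = true
      · simp only [hg, if_pos]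
        obtain ⟨d, hf, hle⟩ := ih (some (c.2.2 - 1 - h)) _ rfl
        simp only [pvGuardMin, decide_eq_true_eq] at hg
        exact ⟨d, hf, by omega⟩
      · simp only [hg]
        exact ih (some av) av rfl

theorem dfold_mem (settled : List (Int × Int × Int)) (l : List (Int × Int × Int)) :
    ∀ (a : Option Int) (c : Int × Int × Int) (h : Int), c ∈ l →
      pvHFor settled c.1 c.2.1 c.2.2 = some h →
      ∃ d, l.foldl
        (fun d c =>
          match pvHFor settled c.1 c.2.1 c.2.2 with
          | none => d
          | some h => if pvGuardMin d (c.2.2 - 1 - h) then some (c.2.2 - 1 - h) else d) a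
        = some d ∧ d ≤ c.2.2 - 1 - h := by
  induction l with
  | nil => intro a c h hc; simp at hc
  | cons c' t ih =>
    intro a c h hc hh
    rw [List.foldl_cons]
    rcases List.mem_cons.mp hc with heq | hmem
    · subst heq
      simp only [hh]
      by_cases hg : pvGuardMin a (c.2.2 - 1 - h) = true
      · rw [if_pos hg]
        exact dfold_mono settled t _ _ rfl
      · rw [if_neg hg]
        cases a with
        | none => exact absurd rfl hg
        | some av =>
          simp only [pvGuardMin, decide_eq_true_eq] at hg
          obtain ⟨d, hf, hle⟩ := dfold_mono settled t (some av) av rfl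
          exact ⟨d, hf, by omega⟩
    · exact ih _ c h hmem hh

theorem dfold_some (settled : List (Int × Int × Int)) (l : List (Int × Int × Int)) :
    ∀ (a : Option Int) (d : Int),
      l.foldl
        (fun d c =>
          match pvHFor settled c.1 c.2.1 c.2.2 with
          | none => d
          | some h => if pvGuardMin d (c.2.2 - 1 - h) then some (c.2.2 - 1 - h) else d) a
        = some d →
      (∃ c ∈ l, ∃ h, pvHFor settled c.1 c.2.1 c.2.2 = some h ∧ d = c.2.2 - 1 - h) ∨ a = some d := by
  induction l with
  | nil => intro a d hf; right; simpa using hf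
  | cons c t ih =>
    intro a d hf
    rw [List.foldl_cons] at hf
    rcases ih _ d hf with ⟨c', hm, h', hh', hd'⟩ | heq
    · exact Or.inl ⟨c', List.mem_cons_of_mem _ hm, h', hh', hd'⟩
    · cases hh : pvHFor settled c.1 c.2.1 c.2.2 with
      | none => rw [hh] at heq; exact Or.inr heq
      | some h =>
        simp only [hh] at heq
        by_cases hg : pvGuardMin a (c.2.2 - 1 - h) = true
        · rw [if_pos hg] at heq
          simp only [Option.some.injEq] at heq
          exact Or.inl ⟨c, List.mem_cons_self, h, hh, heq.symm⟩
        · rw [if_neg hg] at heq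
          exact Or.inr heq

theorem dFor_achieved (brick settled : List (Int × Int × Int)) (d : Int)
    (hd : pvDFor brick settled = some d) :
    ∃ c ∈ brick, ∃ h, pvHFor settled c.1 c.2.1 c.2.2 = some h ∧ d = c.2.2 - 1 - h := by
  rcases dfold_some settled brick none d hd with h | h
  · exact h
  · cases h

theorem dFor_min (brick settled : List (Int × Int × Int)) (c : Int × Int × Int) (h : Int)
    (hc : c ∈ brick) (hh : pvHFor settled c.1 c.2.1 c.2.2 = some h) :
    ∃ d, pvDFor brick settled = some d ∧ d ≤ c.2.2 - 1 - h :=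
  dfold_mem settled brick none c h hc hh

theorem pre_dFor (brick settled : List (Int × Int × Int))
    (hp : Pre_move_brick brick settled) : ∃ d, pvDFor brick settled = some d := by
  obtain ⟨c, hc, hcase⟩ := hp
  have hcand : ∃ z', IsCand settled c.1 c.2.1 c.2.2 z' := by
    rcases hcase with hz | ⟨s, hs, h1, h2, h3⟩
    · exact ⟨0, Or.inl ⟨rfl, hz⟩⟩
    · refine ⟨s.2.2, Or.inr ⟨?_, h3⟩⟩
      have : s = (c.1, c.2.1, s.2.2) := by
        obtain ⟨s1, s2, s3⟩ := s; simp_all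
      rwa [this] at hs
  obtain ⟨z', hz'⟩ := hcand
  obtain ⟨h, hh, -⟩ := hFor_cand settled c.1 c.2.1 c.2.2 z' hz'
  obtain ⟨d, hd, -⟩ := dFor_min brick settled c h hc hh
  exact ⟨d, hd⟩

theorem condA_iff (settled s : List (Int × Int × Int)) :
    pvCondA settled (pvNext s) = true ↔
      ∀ c ∈ s, c.2.2 - 1 ≠ 0 ∧ (c.1, c.2.1, c.2.2 - 1) ∉ settled := by
  simp only [pvCondA, pvNext, List.all_eq_true, PySem.Set.mem_ofList, List.mem_map,
    Bool.and_eq_true, bne_iff_ne, Bool.not_eq_eq_eq_not, Bool.not_true,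
    PySem.Set.contains_eq_listContains]
  constructor
  · intro H c hm
    have := H _ ⟨c, hm, rfl⟩
    simp only [List.contains_eq_mem, decide_eq_false_iff_not] at this
    exact ⟨this.1, this.2⟩
  · rintro H u ⟨c, hm, rfl⟩
    have := H c hm
    simp only [List.contains_eq_mem, decide_eq_false_iff_not]
    exact ⟨this.1, this.2⟩

theorem condA_state (brick settled : List (Int × Int × Int)) (k : Int) :
    pvCondA settled (pvNext (dropK (PySem.Set.ofList brick) k)) = true ↔
      CondK brick settled (k + 1) := by
  rw [condA_iff]
  simp only [CondK, dropK, List.mem_map, PySem.Set.mem_ofList]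
  constructor
  · intro hall c hc
    simpa [sub_sub] using hall _ ⟨c, hc, rfl⟩
  · rintro hall c ⟨c0, hc0, rfl⟩
    simpa [sub_sub] using hall c0 hc0

theorem condA_init (brick settled : List (Int × Int × Int)) :
    pvCondA settled (pvNext brick) = true ↔ CondK brick settled 1 := by
  rw [condA_iff]; rfl

theorem free_below (brick settled : List (Int × Int × Int)) (d m : Int)
    (hd : pvDFor brick settled = some d) (h1 : 1 ≤ m) (h2 : m ≤ d) :
    CondK brick settled m := by
  intro c hc
  constructor
  · intro hz
    have hcand : IsCand settled c.1 c.2.1 c.2.2 0 := Or.inl ⟨rfl, by omega⟩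
    obtain ⟨h, hh, hle⟩ := hFor_cand settled c.1 c.2.1 c.2.2 0 hcand
    obtain ⟨d', hd', hle'⟩ := dFor_min brick settled c h hc hh
    rw [hd] at hd'
    simp only [Option.some.injEq] at hd'
    omega
  · intro hmem
    have hcand : IsCand settled c.1 c.2.1 c.2.2 (c.2.2 - m) := Or.inr ⟨hmem, by omega⟩
    obtain ⟨h, hh, hle⟩ := hFor_cand settled c.1 c.2.1 c.2.2 _ hcand
    obtain ⟨d', hd', hle'⟩ := dFor_min brick settled c h hc hh
    rw [hd] at hd'
    simp only [Option.some.injEq] at hd'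
    omega

theorem blocked_at (brick settled : List (Int × Int × Int)) (d : Int)
    (hd : pvDFor brick settled = some d) : ¬ CondK brick settled (d + 1) := by
  intro hcond
  obtain ⟨c, hc, h, hh, hdv⟩ := dFor_achieved brick settled d hd
  obtain ⟨hz1, hz2⟩ := hcond c hc
  rcases hFor_some settled c.1 c.2.1 c.2.2 h hh with ⟨h0, hz⟩ | ⟨hmem, hlt⟩
  · omega
  · apply hz2
    have : c.2.2 - (d + 1) = h := by omega
    rwa [this]

theorem dFor_nonneg (brick settled : List (Int × Int × Int)) (d : Int)
    (hd : pvDFor brick settled = some d) : 0 ≤ d := by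
  obtain ⟨c, hc, h, hh, hdv⟩ := dFor_achieved brick settled d hd
  rcases hFor_some settled c.1 c.2.1 c.2.2 h hh with ⟨h0, hz⟩ | ⟨hmem, hlt⟩ <;> omega

theorem dec_injective (k : Int) :
    Function.Injective (fun c : Int × Int × Int => (c.1, c.2.1, c.2.2 - k)) := by
  rintro ⟨a1, a2, a3⟩ ⟨b1, b2, b3⟩ h
  simp only [Prod.mk.injEq] at h
  obtain ⟨h1, h2, h3⟩ := h
  simp only [Prod.mk.injEq]
  refine ⟨h1, h2, by omega⟩

theorem add_map {α β : Type} [BEq α] [LawfulBEq α] [BEq β] [LawfulBEq β] (f : α → β)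
    (hf : Function.Injective f) (s : List α) (a : α) :
    PySem.Set.add (s.map f) (f a) = (PySem.Set.add s a).map f := by
  simp only [PySem.Set.add, PySem.Set.contains_eq_listContains]
  by_cases h : a ∈ s
  · simp [h, List.mem_map_of_injective hf]
  · simp [h, List.mem_map_of_injective hf]

theorem foldl_add_map {α β : Type} [BEq α] [LawfulBEq α] [BEq β] [LawfulBEq β] (f : α → β)
    (hf : Function.Injective f) (l s : List α) :
    l.foldl (fun t b => PySem.Set.add t (f b)) (s.map f) = (l.foldl PySem.Set.add s).map f := by
  induction l generalizing s with
  | nil => rfl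
  | cons b t ih => simpa [add_map f hf] using ih (PySem.Set.add s b)

theorem ofList_map {α β : Type} [BEq α] [LawfulBEq α] [BEq β] [LawfulBEq β] (f : α → β)
    (hf : Function.Injective f) (l : List α) :
    PySem.Set.ofList (l.map f) = (PySem.Set.ofList l).map f := by
  rw [PySem.Set.ofList_eq_foldl, PySem.Set.ofList_eq_foldl, List.foldl_map]
  simpa using foldl_add_map f hf l []

theorem le_sum_z (l : List (Int × Int × Int)) (c : Int × Int × Int) (hc : c ∈ l) :
    c.2.2.natAbs ≤ (l.map (fun c => c.2.2.natAbs)).sum := by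
  induction l with
  | nil => simp at hc
  | cons c' t ih =>
    rcases List.mem_cons.mp hc with rfl | hm
    · simp
    · have := ih hm
      simp only [List.map_cons, List.sum_cons]
      omega

theorem fuel_bound (brick settled : List (Int × Int × Int)) (d : Int)
    (hd : pvDFor brick settled = some d) : d.toNat < pvFuel brick settled := by
  obtain ⟨c, hc, h, hh, hdv⟩ := dFor_achieved brick settled d hd
  have hb := le_sum_z brick c hc
  rcases hFor_some settled c.1 c.2.1 c.2.2 h hh with ⟨h0, hz⟩ | ⟨hmem, hlt⟩
  · unfold pvFuel; omega
  · have hs := le_sum_z settled (c.1, c.2.1, h) hmem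
    simp only at hs
    unfold pvFuel; omega

theorem next_state (brick : List (Int × Int × Int)) (k : Int) :
    pvNext (dropK (PySem.Set.ofList brick) k) = dropK (PySem.Set.ofList brick) (k + 1) := by
  unfold pvNext dropK
  rw [List.map_map]
  have hcomp : ((fun c : Int × Int × Int => (c.1, c.2.1, c.2.2 - 1)) ∘
      (fun c : Int × Int × Int => (c.1, c.2.1, c.2.2 - k)))
      = (fun c : Int × Int × Int => (c.1, c.2.1, c.2.2 - (k + 1))) := by
    funext c
    have h3 : c.2.2 - k - 1 = c.2.2 - (k + 1) := by omega
    simp [h3]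
  rw [hcomp]
  exact PySem.Set.ofList_eq_self_of_nodup _
    ((PySem.Set.nodup_ofList brick).map (dec_injective (k + 1)))

theorem next_init (brick : List (Int × Int × Int)) :
    pvNext brick = dropK (PySem.Set.ofList brick) 1 := by
  unfold pvNext dropK
  exact ofList_map _ (dec_injective 1) brick

theorem loop_run (brick settled : List (Int × Int × Int)) (d : Int)
    (hd : pvDFor brick settled = some d) :
    ∀ (n : Nat) (k : Int), 1 ≤ k → k ≤ d → (d - k).toNat < n →
      pvLoopA settled n (dropK (PySem.Set.ofList brick) k) true
        = (dropK (PySem.Set.ofList brick) d, true) := by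
  intro n
  induction n with
  | zero => intro k _ _ h; omega
  | succ n ih =>
    intro k h1 h2 h3
    by_cases hk : k = d
    · subst hk
      have hcond : ¬ pvCondA settled (pvNext (dropK (PySem.Set.ofList brick) k)) = true := by
        rw [condA_state]
        exact blocked_at brick settled k hd
      simp only [pvLoopA, if_neg hcond]
    · have hcond : pvCondA settled (pvNext (dropK (PySem.Set.ofList brick) k)) = true := by
        rw [condA_state]
        exact free_below brick settled d (k + 1) hd (by omega) (by omega)
      simp only [pvLoopA]
      rw [if_pos hcond, next_state]
      exact ih (k + 1) (by omega) (by omega) (by omega)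

theorem move_brick_eq (brick settled : List (Int × Int × Int))
    (hp : Pre_move_brick brick settled) :
    move_brick brick settled = move_brick_alt brick settled := by
  obtain ⟨d, hd⟩ := pre_dFor brick settled hp
  have hd0 := dFor_nonneg brick settled d hd
  have hfb := fuel_bound brick settled d hd
  unfold move_brick move_brick_alt
  rw [hd]
  have hfuel : pvFuel brick settled = (pvFuel brick settled - 1) + 1 := by
    unfold pvFuel; omega
  rw [hfuel]
  by_cases hdz : d = 0
  · subst hdz
    have hcond : ¬ pvCondA settled (pvNext brick) = true := by
      rw [condA_init]
      simpa using blocked_at brick settled 0 hd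
    simp only [pvLoopA, if_neg hcond, if_true]
  · have hcond : pvCondA settled (pvNext brick) = true := by
      rw [condA_init]
      exact free_below brick settled d 1 hd (by omega) (by omega)
    simp only [pvLoopA, if_pos hcond]
    rw [next_init]
    rw [loop_run brick settled d hd _ 1 (by omega) (by omega) (by omega)]
    rw [if_neg hdz, ofList_map _ (dec_injective d) brick]
    rfl

-- ===== VERDICT (by name: the statement is the Claim_ definition above) =====
theorem move_brick_spec : Claim_equal_move_brick := by
  intro brick settled _ hpre
  unfold Spec_move_brick
  exact move_brick_eq brick settled hpre
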